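-- pv_equiv track=rewrite | github.com/HonkCY/highlight-extraction | clip.py | get_counter_seq
-- ===== SOURCE A (Python) =====
-- def get_counter_seq(seq):
--     last_t = 0
--     counter_seq = []
--     for ts in seq:
--         if ts[0]-last_t < 10:
--             last_t = ts[1] + 1
--             continue
--         counter_seq.append((last_t,ts[0]-1))
--         last_t = ts[1] + 1
--     return counter_seq
-- ===== SOURCE B (Python) =====
-- def get_counter_seq(seq):
--     # Event-stream view: flatten the timeline into alternating boundaries
--     # [0, s1-1, e1+1, s2-1, e2+1, ...]; consecutive boundary pairs at even
--     # positions delimit the candidate gap intervals; keep those of width >= 9.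
--     bounds = [0]
--     for s, e in seq:
--         bounds.append(s - 1)
--         bounds.append(e + 1)
--     return [(bounds[2 * i], bounds[2 * i + 1])
--             for i in range(len(seq))
--             if bounds[2 * i + 1] - bounds[2 * i] >= 9]
-- ===== Notes on version B (the rewrite author's own statement) =====
-- stated objective: alternative
-- what changed: Replaced the stateful accumulator loop by an event-stream formulation: the segments are flattened into a single boundary timeline [0, s1-1, e1+1, s2-1, e2+1, ...], and the result is read off by indexing pairs of adjacent boundaries at even positions, keeping those at least 9 apart.
import Mathlib
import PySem

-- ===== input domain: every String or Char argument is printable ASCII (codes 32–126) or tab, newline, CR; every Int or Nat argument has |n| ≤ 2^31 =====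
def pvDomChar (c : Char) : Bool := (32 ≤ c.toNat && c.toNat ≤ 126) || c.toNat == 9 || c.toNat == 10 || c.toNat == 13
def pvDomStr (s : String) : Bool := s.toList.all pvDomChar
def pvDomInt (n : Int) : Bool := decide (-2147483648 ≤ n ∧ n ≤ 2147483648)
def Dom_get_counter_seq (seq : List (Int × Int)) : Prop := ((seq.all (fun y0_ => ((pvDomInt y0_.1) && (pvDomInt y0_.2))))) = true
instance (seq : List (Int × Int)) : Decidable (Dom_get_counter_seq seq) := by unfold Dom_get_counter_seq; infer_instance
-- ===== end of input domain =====

-- B replaces A's stateful accumulator loop by an event-stream formulation: flatten the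
-- segments into one boundary timeline [0, s1-1, e1+1, s2-1, e2+1, ...] and read the
-- answer off adjacent boundary pairs at even positions (alternative decomposition, same cost).

-- ===== PORT A =====
-- state = (last_t, counter_seq); the for-loop is a foldl over seq
def get_counter_seq (seq : List (Int × Int)) : List (Int × Int) :=
  (seq.foldl
    (fun (st : Int × List (Int × Int)) ts =>
      if ts.1 - st.1 < 10 then (ts.2 + 1, st.2)
      else (ts.2 + 1, st.2 ++ [(st.1, ts.1 - 1)]))
    (0, [])).2

-- ===== PORT B =====
-- bounds = [0]; for s,e in seq: append s-1; append e+1 — then one indexed comprehension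
def get_counter_seq_alt (seq : List (Int × Int)) : List (Int × Int) :=
  let bounds : List Int := seq.foldl (fun b ts => b ++ [ts.1 - 1, ts.2 + 1]) [0]
  (PySem.List.pyRange 0 (seq.length : Int) 1).filterMap (fun i =>
    if 9 ≤ PySem.List.pyGetD bounds (2 * i + 1) 0 - PySem.List.pyGetD bounds (2 * i) 0 then
      some (PySem.List.pyGetD bounds (2 * i) 0, PySem.List.pyGetD bounds (2 * i + 1) 0)
    else none)

-- ===== PRECONDITION & SPEC =====
def Spec_get_counter_seq (seq : List (Int × Int)) (out : List (Int × Int)) : Prop := out = get_counter_seq_alt seq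
instance (seq : List (Int × Int)) (out : List (Int × Int)) : Decidable (Spec_get_counter_seq seq out) := by unfold Spec_get_counter_seq; infer_instance

-- ===== CLAIM (what is proved, stated in full; the proofs are below) =====
def Claim_equal_get_counter_seq : Prop := ∀ (seq : List (Int × Int)), Dom_get_counter_seq seq → Spec_get_counter_seq seq (get_counter_seq seq)

-- ===== LEMMAS AND PROOFS =====

-- reference recursion: the gap intervals emitted starting from a given last_t
def goGaps (last : Int) : List (Int × Int) → List (Int × Int)
  | [] => []
  | ts :: rest =>
      (if ts.1 - last < 10 then [] else [(last, ts.1 - 1)]) ++ goGaps (ts.2 + 1) rest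

-- A's fold, from any state, appends exactly the gaps of goGaps
theorem foldA_eq_goGaps (seq : List (Int × Int)) : ∀ (last : Int) (acc : List (Int × Int)),
    (seq.foldl
      (fun (st : Int × List (Int × Int)) ts =>
        if ts.1 - st.1 < 10 then (ts.2 + 1, st.2)
        else (ts.2 + 1, st.2 ++ [(st.1, ts.1 - 1)]))
      (last, acc)).2 = acc ++ goGaps last seq := by
  induction seq with
  | nil => intro last acc; simp [goGaps]
  | cons ts rest ih =>
      intro last acc
      by_cases h : ts.1 - last < 10 <;>
        simp [List.foldl, goGaps, h, ih, List.append_assoc]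

-- pyRange 0 n 1 enumerates the natural indices
theorem pyRange_zero_eq_map_range (n : Nat) :
    PySem.List.pyRange 0 (n : Int) 1 = List.map (fun (k : Nat) => (k : Int)) (List.range n) := by
  rw [PySem.List.pyRange_zero_natCast]

-- head of B's comprehension: the candidate interval read from the first two boundaries
theorem head_eval (a b c : Int) (l : List Int) :
    (if 9 ≤ PySem.List.pyGetD (a :: b :: c :: l) (2 * ((0 : Nat) : Int) + 1) 0 -
          PySem.List.pyGetD (a :: b :: c :: l) (2 * ((0 : Nat) : Int)) 0 then
        some (PySem.List.pyGetD (a :: b :: c :: l) (2 * ((0 : Nat) : Int)) 0,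
              PySem.List.pyGetD (a :: b :: c :: l) (2 * ((0 : Nat) : Int) + 1) 0)
      else none)
    = if 9 ≤ b - a then some (a, b) else none := by
  simp only [Nat.cast_zero, mul_zero, zero_add]
  simp [pysem]

theorem indexed_eq_goGaps (seq : List (Int × Int)) : ∀ (last : Int),
    (List.map (fun (k : Nat) => (k : Int)) (List.range seq.length)).filterMap (fun i =>
      let bounds := last :: seq.flatMap (fun ts => [ts.1 - 1, ts.2 + 1])
      if 9 ≤ PySem.List.pyGetD bounds (2 * i + 1) 0 - PySem.List.pyGetD bounds (2 * i) 0 then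
        some (PySem.List.pyGetD bounds (2 * i) 0, PySem.List.pyGetD bounds (2 * i + 1) 0)
      else none)
    = goGaps last seq := by
  induction seq with
  | nil => intro last; rfl
  | cons ts rest ih =>
      intro last
      simp only [List.length_cons, List.flatMap_cons, List.cons_append, List.nil_append]
      rw [List.range_succ_eq_map]
      simp only [List.map_cons, List.map_map, Function.comp_def]
      have idx : ∀ (k : Nat),
          (fun i : Int =>
            if 9 ≤ PySem.List.pyGetD (last :: (ts.1 - 1) :: (ts.2 + 1) ::
                  rest.flatMap (fun ts => [ts.1 - 1, ts.2 + 1])) (2 * i + 1) 0 -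
                PySem.List.pyGetD (last :: (ts.1 - 1) :: (ts.2 + 1) ::
                  rest.flatMap (fun ts => [ts.1 - 1, ts.2 + 1])) (2 * i) 0 then
              some (PySem.List.pyGetD (last :: (ts.1 - 1) :: (ts.2 + 1) ::
                      rest.flatMap (fun ts => [ts.1 - 1, ts.2 + 1])) (2 * i) 0,
                    PySem.List.pyGetD (last :: (ts.1 - 1) :: (ts.2 + 1) ::
                      rest.flatMap (fun ts => [ts.1 - 1, ts.2 + 1])) (2 * i + 1) 0)
            else none) (((k + 1 : Nat) : Int))
          = (fun i : Int =>
            if 9 ≤ PySem.List.pyGetD ((ts.2 + 1) ::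
                  rest.flatMap (fun ts => [ts.1 - 1, ts.2 + 1])) (2 * i + 1) 0 -
                PySem.List.pyGetD ((ts.2 + 1) ::
                  rest.flatMap (fun ts => [ts.1 - 1, ts.2 + 1])) (2 * i) 0 then
              some (PySem.List.pyGetD ((ts.2 + 1) ::
                      rest.flatMap (fun ts => [ts.1 - 1, ts.2 + 1])) (2 * i) 0,
                    PySem.List.pyGetD ((ts.2 + 1) ::
                      rest.flatMap (fun ts => [ts.1 - 1, ts.2 + 1])) (2 * i + 1) 0)
            else none) ((k : Nat) : Int) := by
        intro k
        have h2 : (2 * ((k + 1 : Nat) : Int) + 1) = ((2 * k + 3 : Nat) : Int) := by push_cast; ring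
        have h1 : (2 * ((k + 1 : Nat) : Int)) = ((2 * k + 2 : Nat) : Int) := by push_cast; ring
        have h4 : (2 * ((k : Nat) : Int) + 1) = ((2 * k + 1 : Nat) : Int) := by push_cast; ring
        have h3 : (2 * ((k : Nat) : Int)) = ((2 * k : Nat) : Int) := by push_cast; ring
        simp only []
        rw [h2, h1, h4, h3]
        simp only [PySem.List.pyGetD_natCast]
        rw [show 2*k+2 = (2*k)+1+1 by omega, show 2*k+3 = (2*k+1)+1+1 by omega]
        simp
      have htail :
          List.filterMap (fun i : Int =>
            if 9 ≤ PySem.List.pyGetD (last :: (ts.1 - 1) :: (ts.2 + 1) ::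
                  rest.flatMap (fun ts => [ts.1 - 1, ts.2 + 1])) (2 * i + 1) 0 -
                PySem.List.pyGetD (last :: (ts.1 - 1) :: (ts.2 + 1) ::
                  rest.flatMap (fun ts => [ts.1 - 1, ts.2 + 1])) (2 * i) 0 then
              some (PySem.List.pyGetD (last :: (ts.1 - 1) :: (ts.2 + 1) ::
                      rest.flatMap (fun ts => [ts.1 - 1, ts.2 + 1])) (2 * i) 0,
                    PySem.List.pyGetD (last :: (ts.1 - 1) :: (ts.2 + 1) ::
                      rest.flatMap (fun ts => [ts.1 - 1, ts.2 + 1])) (2 * i + 1) 0)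
            else none)
            (List.map (fun (k : Nat) => ((k + 1 : Nat) : Int)) (List.range rest.length))
          = goGaps (ts.2 + 1) rest := by
        have h := ih (ts.2 + 1)
        rw [← h, List.filterMap_map, List.filterMap_map]
        congr 1
        funext k
        simpa using idx k
      by_cases h : ts.1 - last < 10
      · have hc : ¬ (9 ≤ ts.1 - 1 - last) := by omega
        have hhead : (if 9 ≤ PySem.List.pyGetD (last :: (ts.1 - 1) :: (ts.2 + 1) ::
              rest.flatMap (fun ts => [ts.1 - 1, ts.2 + 1])) (2 * ((0 : Nat) : Int) + 1) 0 -
            PySem.List.pyGetD (last :: (ts.1 - 1) :: (ts.2 + 1) ::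
              rest.flatMap (fun ts => [ts.1 - 1, ts.2 + 1])) (2 * ((0 : Nat) : Int)) 0 then
          some (PySem.List.pyGetD (last :: (ts.1 - 1) :: (ts.2 + 1) ::
                  rest.flatMap (fun ts => [ts.1 - 1, ts.2 + 1])) (2 * ((0 : Nat) : Int)) 0,
                PySem.List.pyGetD (last :: (ts.1 - 1) :: (ts.2 + 1) ::
                  rest.flatMap (fun ts => [ts.1 - 1, ts.2 + 1])) (2 * ((0 : Nat) : Int) + 1) 0)
          else none) = none := by rw [head_eval]; simp [hc]
        simp only [List.filterMap_cons]
        rw [hhead]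
        simp only [goGaps, h, if_true, List.nil_append]
        exact htail
      · have hc : 9 ≤ ts.1 - 1 - last := by omega
        have hhead : (if 9 ≤ PySem.List.pyGetD (last :: (ts.1 - 1) :: (ts.2 + 1) ::
              rest.flatMap (fun ts => [ts.1 - 1, ts.2 + 1])) (2 * ((0 : Nat) : Int) + 1) 0 -
            PySem.List.pyGetD (last :: (ts.1 - 1) :: (ts.2 + 1) ::
              rest.flatMap (fun ts => [ts.1 - 1, ts.2 + 1])) (2 * ((0 : Nat) : Int)) 0 then
          some (PySem.List.pyGetD (last :: (ts.1 - 1) :: (ts.2 + 1) ::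
                  rest.flatMap (fun ts => [ts.1 - 1, ts.2 + 1])) (2 * ((0 : Nat) : Int)) 0,
                PySem.List.pyGetD (last :: (ts.1 - 1) :: (ts.2 + 1) ::
                  rest.flatMap (fun ts => [ts.1 - 1, ts.2 + 1])) (2 * ((0 : Nat) : Int) + 1) 0)
          else none) = some (last, ts.1 - 1) := by rw [head_eval]; simp [hc]
        simp only [List.filterMap_cons]
        rw [hhead]
        simp only [goGaps, h, if_false, List.singleton_append]
        exact congrArg _ htail

-- ===== VERDICT (by name: the statement is the Claim_ definition above) =====
theorem get_counter_seq_spec : Claim_equal_get_counter_seq := by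
  intro seq _
  unfold Spec_get_counter_seq get_counter_seq get_counter_seq_alt
  rw [foldA_eq_goGaps, List.nil_append,
    PySem.List.foldl_append_eq_flatMap (fun ts => [ts.1 - 1, ts.2 + 1]) seq [0],
    List.singleton_append, pyRange_zero_eq_map_range]
  exact (indexed_eq_goGaps seq 0).symm
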